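-- pv_equiv track=rewrite | github.com/drozdd80/advent-of-code-2024 | day_10/main.py | rr2
-- ===== SOURCE A (Python) =====
-- def in_limits(i, j, height, width):
--     return (i >= 0) and (i < height) and (j >=0) and (j < width)
--
-- def rr2(field, res, i, j, height, width, last_value, path, paths):
--     path=path[:]
--     if in_limits(i, j, height, width):
--         current_value = field[i][j]
--         if current_value - last_value == 1:
--             path.append((i,j))
--             if field[i][j] == 9:
--                 res += 1
--                 paths.append(path)
--                 return res
--             else:
--                 res = rr2(field, res, i=i+1, j=j, height=height, width=width, last_value=current_value, path=path, paths=paths)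
--                 res = rr2(field, res, i=i, j=j+1, height=height, width=width, last_value=current_value, path=path, paths=paths)
--                 res = rr2(field, res, i=i-1, j=j, height=height, width=width, last_value=current_value, path=path, paths=paths)
--                 res = rr2(field, res, i=i, j=j-1, height=height, width=width, last_value=current_value, path=path, paths=paths)
--     return res
-- ===== SOURCE B (Python) =====
-- def in_limits(i, j, height, width):
--     return (i >= 0) and (i < height) and (j >= 0) and (j < width)
--
-- def rr2(field, res, i, j, height, width, last_value, path, paths):
--     count = res
--     stack = [(i, j, last_value, list(path))]
--     while stack:
--         ci, cj, lv, p = stack.pop()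
--         if in_limits(ci, cj, height, width):
--             cv = field[ci][cj]
--             if cv - lv == 1:
--                 p = p + [(ci, cj)]
--                 if cv == 9:
--                     count += 1
--                     paths.append(p)
--                 else:
--                     stack.extend([(ci, cj - 1, cv, p), (ci - 1, cj, cv, p),
--                                   (ci, cj + 1, cv, p), (ci + 1, cj, cv, p)])
--     return count
-- ===== Notes on version B (the rewrite author's own statement) =====
-- stated objective: alternative
-- what changed: The recursive four-way DFS is replaced by an iterative while-loop over an explicit stack of (i, j, last_value, path) frames, pushing the neighbours in reversed order so they pop in A's recursion order; a local counter replaces the threaded res accumulator.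
-- outside the precondition, e.g. on rr2([[5]], 0, 0, 0, 2, 1, 0, [], []): A returns 0, B returns 0
import Mathlib
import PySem

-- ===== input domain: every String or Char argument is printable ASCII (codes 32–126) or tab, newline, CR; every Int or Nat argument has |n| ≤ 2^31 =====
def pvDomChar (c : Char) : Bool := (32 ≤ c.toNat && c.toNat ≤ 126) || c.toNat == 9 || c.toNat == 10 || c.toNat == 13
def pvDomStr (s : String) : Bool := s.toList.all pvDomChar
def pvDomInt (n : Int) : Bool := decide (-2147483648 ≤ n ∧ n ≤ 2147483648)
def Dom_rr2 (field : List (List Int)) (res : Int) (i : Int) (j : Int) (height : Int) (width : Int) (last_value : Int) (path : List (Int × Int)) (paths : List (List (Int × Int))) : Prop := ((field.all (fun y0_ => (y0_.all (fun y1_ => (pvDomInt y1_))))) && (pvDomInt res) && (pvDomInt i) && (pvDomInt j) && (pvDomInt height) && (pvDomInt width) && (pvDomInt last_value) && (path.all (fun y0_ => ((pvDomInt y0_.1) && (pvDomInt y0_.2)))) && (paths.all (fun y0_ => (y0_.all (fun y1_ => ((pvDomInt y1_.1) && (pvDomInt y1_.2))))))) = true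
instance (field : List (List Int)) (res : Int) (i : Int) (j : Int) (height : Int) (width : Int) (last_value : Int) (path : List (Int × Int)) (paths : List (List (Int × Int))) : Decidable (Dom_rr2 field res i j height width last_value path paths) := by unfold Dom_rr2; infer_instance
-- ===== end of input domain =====

-- ===== PORT A =====
-- B rewrites the recursive DFS as an explicit stack loop (different decomposition, same cost);
-- the claim is about the RETURN value (both Pythons also append the found paths to `paths`
-- identically, but that mutation is not part of the proved claim).
-- Python's `in_limits`
def inLimits (i j height width : Int) : Bool :=
  decide (0 <= i) && decide (i < height) && decide (0 <= j) && decide (j < width)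

-- Python's `field[i][j]` (none = IndexError; excluded by Pre_)
def cellAt (field : List (List Int)) (i j : Int) : Option Int :=
  (PySem.List.pyGet? field i).bind fun row => PySem.List.pyGet? row j

-- Literal port of A's recursion, threading (res, paths); the Nat fuel is only a totality
-- guard: an increasing chain visits pairwise-distinct cells, so its depth is at most
-- height*width and the initial fuel height.toNat*width.toNat+1 is never exhausted.
def rr2F (field : List (List Int)) (height width : Int) :
    Nat → Int → Int → Int → Int → List (Int × Int) → List (List (Int × Int)) →
    Int × List (List (Int × Int))
  | 0, res, _, _, _, _, paths => (res, paths)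
  | Nat.succ f, res, i, j, lv, path, paths =>
    if inLimits i j height width then
      match cellAt field i j with
      | none => (res, paths)
      | some cv =>
        if cv - lv = 1 then
          let p' := path ++ [(i, j)]
          if cv = 9 then (res + 1, paths ++ [p'])
          else
            let s1 := rr2F field height width f res (i + 1) j cv p' paths
            let s2 := rr2F field height width f s1.1 i (j + 1) cv p' s1.2
            let s3 := rr2F field height width f s2.1 (i - 1) j cv p' s2.2
            rr2F field height width f s3.1 i (j - 1) cv p' s3.2
        else (res, paths)
    else (res, paths)

def rr2 (field : List (List Int)) (res : Int) (i : Int) (j : Int) (height : Int) (width : Int) (last_value : Int) (path : List (Int × Int)) (paths : List (List (Int × Int))) : Int :=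
  (rr2F field height width (height.toNat * width.toNat + 1) res i j last_value path paths).1

-- ===== PORT B =====
-- Port of Source B's while loop over an explicit stack (head of the list = top of the stack;
-- Source B pushes the four neighbours in reversed order and pops from the end, which is the
-- same as consing (i+1,j),(i,j+1),(i-1,j),(i,j-1) here).  Each frame carries the same
-- totality fuel as the A port.
def rr2Loop (field : List (List Int)) (height width : Int) :
    List (Nat × Int × Int × Int × List (Int × Int)) → Int → List (List (Int × Int)) →
    Int × List (List (Int × Int))
  | [], cnt, paths => (cnt, paths)
  | (f, i, j, lv, p) :: rest, cnt, paths =>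
    match f with
    | 0 => rr2Loop field height width rest cnt paths
    | Nat.succ f' =>
      if inLimits i j height width then
        match cellAt field i j with
        | none => rr2Loop field height width rest cnt paths
        | some cv =>
          if cv - lv = 1 then
            let p' := p ++ [(i, j)]
            if cv = 9 then rr2Loop field height width rest (cnt + 1) (paths ++ [p'])
            else rr2Loop field height width
              ((f', i + 1, j, cv, p') :: (f', i, j + 1, cv, p') ::
               (f', i - 1, j, cv, p') :: (f', i, j - 1, cv, p') :: rest) cnt paths
          else rr2Loop field height width rest cnt paths
      else rr2Loop field height width rest cnt paths
  termination_by st _ _ => (st.map fun fr => 5 ^ fr.1).sum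
  decreasing_by
    all_goals simp [List.map_cons, List.sum_cons, pow_succ]
    all_goals have h5 : 0 < 5 ^ f' := Nat.pow_pos (by norm_num)
    all_goals omega

def rr2_alt (field : List (List Int)) (res : Int) (i : Int) (j : Int) (height : Int) (width : Int) (last_value : Int) (path : List (Int × Int)) (paths : List (List (Int × Int))) : Int :=
  (rr2Loop field height width [(height.toNat * width.toNat + 1, i, j, last_value, path)] res paths).1

-- ===== PRECONDITION & SPEC =====
-- Pre_ excludes inputs whose declared height/width exceed the actual shape of `field` while
-- the start cell is inside the declared limits: there the recursion can index a missing
-- row/column and raise IndexError (on some such inputs A happens to prune before reaching a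
-- missing cell and returns; those are excluded with the rest of the mis-shaped inputs).
def Pre_rr2 (field : List (List Int)) (res : Int) (i : Int) (j : Int) (height : Int) (width : Int) (last_value : Int) (path : List (Int × Int)) (paths : List (List (Int × Int))) : Prop :=
  (¬ (0 ≤ i ∧ i < height ∧ 0 ≤ j ∧ j < width)) ∨
  (height ≤ (field.length : Int) ∧ ∀ row ∈ field, width ≤ (row.length : Int))
instance (field : List (List Int)) (res : Int) (i : Int) (j : Int) (height : Int) (width : Int) (last_value : Int) (path : List (Int × Int)) (paths : List (List (Int × Int))) : Decidable (Pre_rr2 field res i j height width last_value path paths) := by unfold Pre_rr2; infer_instance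

def pvWitness_rr2 : List (List Int) × Int × Int × Int × Int × Int × Int × (List (Int × Int)) × (List (List (Int × Int))) :=
  ([[1, 2], [0, 9]], 0, 0, 0, 2, 2, 0, [], [])

def Spec_rr2 (field : List (List Int)) (res : Int) (i : Int) (j : Int) (height : Int) (width : Int) (last_value : Int) (path : List (Int × Int)) (paths : List (List (Int × Int))) (out : Int) : Prop := out = rr2_alt field res i j height width last_value path paths
instance (field : List (List Int)) (res : Int) (i : Int) (j : Int) (height : Int) (width : Int) (last_value : Int) (path : List (Int × Int)) (paths : List (List (Int × Int))) (out : Int) : Decidable (Spec_rr2 field res i j height width last_value path paths out) := by unfold Spec_rr2; infer_instance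

-- ===== CLAIM (what is proved, stated in full; the proofs are below) =====
def Claim_equal_rr2 : Prop := ∀ (field : List (List Int)) (res : Int) (i : Int) (j : Int) (height : Int) (width : Int) (last_value : Int) (path : List (Int × Int)) (paths : List (List (Int × Int))), Dom_rr2 field res i j height width last_value path paths → Pre_rr2 field res i j height width last_value path paths → Spec_rr2 field res i j height width last_value path paths (rr2 field res i j height width last_value path paths)

-- ===== LEMMAS AND PROOFS =====

theorem pvWitness_rr2_ok :
    Dom_rr2 pvWitness_rr2.1 pvWitness_rr2.2.1 pvWitness_rr2.2.2.1 pvWitness_rr2.2.2.2.1 pvWitness_rr2.2.2.2.2.1 pvWitness_rr2.2.2.2.2.2.1 pvWitness_rr2.2.2.2.2.2.2.1 pvWitness_rr2.2.2.2.2.2.2.2.1 pvWitness_rr2.2.2.2.2.2.2.2.2 ∧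
    Pre_rr2 pvWitness_rr2.1 pvWitness_rr2.2.1 pvWitness_rr2.2.2.1 pvWitness_rr2.2.2.2.1 pvWitness_rr2.2.2.2.2.1 pvWitness_rr2.2.2.2.2.2.1 pvWitness_rr2.2.2.2.2.2.2.1 pvWitness_rr2.2.2.2.2.2.2.2.1 pvWitness_rr2.2.2.2.2.2.2.2.2 := by
  constructor <;> decide

-- Key simulation lemma: running the stack loop on one frame equals running A's recursion on
-- that frame (with the same fuel) and then continuing with the rest of the stack.
theorem loop_frame (field : List (List Int)) (height width : Int) :
    ∀ (f : Nat) (i j lv : Int) (p : List (Int × Int))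
      (rest : List (Nat × Int × Int × Int × List (Int × Int)))
      (cnt : Int) (paths : List (List (Int × Int))),
    rr2Loop field height width ((f, i, j, lv, p) :: rest) cnt paths =
      rr2Loop field height width rest
        (rr2F field height width f cnt i j lv p paths).1
        (rr2F field height width f cnt i j lv p paths).2 := by
  intro f
  induction f with
  | zero => intro i j lv p rest cnt paths; simp [rr2Loop, rr2F]
  | succ f ih =>
    intro i j lv p rest cnt paths
    rw [rr2Loop, rr2F]
    by_cases hl : inLimits i j height width = true
    · simp only [hl, if_true]
      cases hc : cellAt field i j with
      | none => simp
      | some cv =>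
        by_cases h1 : cv - lv = 1
        · simp only [h1, if_true]
          by_cases h9 : cv = (9 : Int)
          · simp [h9]
          · simp only [h9, if_false]
            rw [ih, ih, ih, ih]
        · simp [h1]
    · simp [hl]

-- ===== VERDICT (by name: the statement is the Claim_ definition above) =====
theorem rr2_spec : Claim_equal_rr2 := by
  intro field res i j height width last_value path paths _ _
  unfold Spec_rr2 rr2 rr2_alt
  rw [loop_frame, rr2Loop]
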